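-- pv_equiv track=rewrite | github.com/picacat/pyMedical | libs/string_utils.py | get_mask_id
-- ===== SOURCE A (Python) =====
-- def xstr(string):
--     if string is None:
--         return ''
--
--     return str(string)
--
-- def get_mask_id(patient_id, length):
--     patient_id = xstr(patient_id)
--     if patient_id == '':
--         return ''
--
--     mask_id_list = list(patient_id)
--     for i, count in zip(range(len(mask_id_list)-1, -1, -1), range(len(mask_id_list))):
--         if count >= length:
--             break
--
--         mask_id_list[i] = '*'
--
--     mask_id = ''.join(mask_id_list)
--
--     return mask_id
-- ===== SOURCE B (Python) =====
-- def get_mask_id(patient_id, length):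
--     if patient_id is None:
--         return ''
--     s = str(patient_id)
--     if s == '':
--         return ''
--     n = len(s)
--     k = max(0, min(n, length))
--     return s[:n - k] + '*' * k
-- ===== Notes on version B (the rewrite author's own statement) =====
-- stated objective: simpler
-- what changed: Replaces the backwards index-by-index list-mutation loop (zip of two ranges with a break) by a closed-form slice plus '*' repeated k = max(0, min(n, length)) times; the per-character Python-level loop disappears, so it is also measurably faster by a constant factor.
import Mathlib
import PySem

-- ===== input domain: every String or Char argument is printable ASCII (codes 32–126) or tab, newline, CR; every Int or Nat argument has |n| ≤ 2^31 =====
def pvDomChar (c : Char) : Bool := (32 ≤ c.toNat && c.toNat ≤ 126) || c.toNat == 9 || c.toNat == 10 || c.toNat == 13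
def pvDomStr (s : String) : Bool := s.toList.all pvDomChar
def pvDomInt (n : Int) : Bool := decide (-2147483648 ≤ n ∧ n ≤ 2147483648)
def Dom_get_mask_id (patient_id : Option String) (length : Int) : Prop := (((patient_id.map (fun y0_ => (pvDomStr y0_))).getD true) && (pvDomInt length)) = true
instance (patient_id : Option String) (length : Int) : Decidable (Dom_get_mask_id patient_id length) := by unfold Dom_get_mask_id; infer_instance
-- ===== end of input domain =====

-- B replaces A's backwards index-by-index list-mutation loop by one slice plus a repeated-asterisk
-- suffix computed in closed form (objective: simpler).

-- ===== PORT A =====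
def xstr (string : Option String) : String :=
  match string with
  | none => ""
  | some s => s

-- the 'for i, count in zip(...)' loop with its 'break'
def maskLoop (maskIdList : List Char) (pairs : List (Int × Int)) (length : Int) : List Char :=
  match pairs with
  | [] => maskIdList
  | (i, count) :: rest =>
    if count ≥ length then maskIdList
    else maskLoop (PySem.List.pySetD maskIdList i '*') rest length

def get_mask_id (patient_id : Option String) (length : Int) : String :=
  let pid := xstr patient_id
  if pid = "" then ""
  else
    let maskIdList := pid.toList
    let pairs := List.zip (PySem.List.pyRange ((maskIdList.length : Int) - 1) (-1) (-1))
                          (PySem.List.pyRange 0 (maskIdList.length : Int) 1)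
    String.ofList (maskLoop maskIdList pairs length)

-- ===== PORT B =====
def get_mask_id_alt (patient_id : Option String) (length : Int) : String :=
  match patient_id with
  | none => ""
  | some s =>
    if s = "" then ""
    else
      let t := s.toList
      let n : Int := t.length
      let k : Int := max 0 (min n length)
      String.ofList (PySem.List.slice t none (some (n - k)) ++ List.replicate k.toNat '*')

-- ===== PRECONDITION & SPEC =====
def Spec_get_mask_id (patient_id : Option String) (length : Int) (out : String) : Prop := out = get_mask_id_alt patient_id length
instance (patient_id : Option String) (length : Int) (out : String) : Decidable (Spec_get_mask_id patient_id length out) := by unfold Spec_get_mask_id; infer_instance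

-- ===== CLAIM (what is proved, stated in full; the proofs are below) =====
def Claim_equal_get_mask_id : Prop := ∀ (patient_id : Option String) (length : Int), Dom_get_mask_id patient_id length → Spec_get_mask_id patient_id length (get_mask_id patient_id length)

-- ===== LEMMAS AND PROOFS =====

-- After processing the pairs (m-1-t, c+t) for t = 0,...,m-1 the loop has replaced the
-- last min(length-c, m) (clamped at 0) of the first m entries by '*'.
lemma maskLoop_spec (m : Nat) : ∀ (l : List Char) (c length : Int), m ≤ l.length →
    maskLoop l ((List.range m).map (fun t : Nat => ((m : Int) - 1 - (t : Int), c + (t : Int)))) length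
      = l.take (m - (min (length - c) (m : Int)).toNat)
        ++ List.replicate (min (length - c) (m : Int)).toNat '*' ++ l.drop m := by
  induction m with
  | zero =>
    intro l c length _
    simp [maskLoop]
  | succ m ih =>
    intro l c length hm
    rw [List.range_succ_eq_map, List.map_cons, List.map_map]
    simp only [maskLoop]
    by_cases hc : c + (0 : Nat) ≥ length
    · rw [if_pos (by push_cast at hc ⊢; omega)]
      have hk : (min (length - c) ((m + 1 : Nat) : Int)).toNat = 0 := by push_cast at hc ⊢; omega
      rw [hk]
      simp
    · rw [if_neg (by push_cast at hc ⊢; omega)]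
      have hidx : ((m + 1 : Nat) : Int) - 1 - ((0 : Nat) : Int) = ((m : Nat) : Int) := by push_cast; ring
      rw [hidx, PySem.List.pySetD_natCast]
      have hmap : (List.range m).map ((fun t : Nat => (((m + 1 : Nat) : Int) - 1 - (t : Int), c + (t : Int))) ∘ Nat.succ)
          = (List.range m).map (fun t : Nat => (((m : Nat) : Int) - 1 - (t : Int), (c + 1) + (t : Int))) := by
        apply List.map_congr_left
        intro t _
        simp [Function.comp]
        constructor <;> push_cast <;> ring_nf
      rw [hmap]
      rw [ih (l.set m '*') (c + 1) length (by simp; omega)]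
      have hmlt : m < l.length := by omega
      have hc' : ¬ c + (0 : Nat) ≥ length := hc
      push_cast at hc'
      set k := (min (length - (c + 1)) ((m : Nat) : Int)).toNat with hkdef
      have hk1 : (min (length - c) ((m + 1 : Nat) : Int)).toNat = k + 1 := by
        push_cast; push_cast at hkdef; omega
      rw [hk1]
      have htake : (l.set m '*').take (m - k) = l.take (m - k) := by
        rw [List.take_set]
        exact List.set_eq_of_length_le (by rw [List.length_take]; omega)
      have h2 : l.drop m = l[m] :: l.drop (m + 1) := List.drop_eq_getElem_cons hmlt
      have hdrop : (l.set m '*').drop m = '*' :: l.drop (m + 1) := by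
        rw [List.drop_set, if_neg (lt_irrefl m), Nat.sub_self, h2, List.set_cons_zero]
      rw [htake, hdrop]
      have : m + 1 - (k + 1) = m - k := by omega
      rw [this]
      rw [List.replicate_succ']
      simp

-- ===== VERDICT (by name: the statement is the Claim_ definition above) =====
theorem get_mask_id_spec : Claim_equal_get_mask_id := by
  intro patient_id length _
  unfold Spec_get_mask_id get_mask_id get_mask_id_alt xstr
  cases patient_id with
  | none => simp
  | some s =>
    simp only
    by_cases hs : s = ""
    · simp [hs]
    · rw [if_neg hs, if_neg hs]
      set l := s.toList with hl
      set n : Nat := l.length with hn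
      have hz : List.zip (PySem.List.pyRange ((n : Int) - 1) (-1) (-1)) (PySem.List.pyRange 0 (n : Int) 1)
          = (List.range n).map (fun t : Nat => ((n : Int) - 1 - (t : Int), (0 : Int) + (t : Int))) := by
        rw [PySem.List.pyRange_neg_one, PySem.List.pyRange_one]
        have e1 : (((n : Int) - 1) - (-1)).toNat = n := by omega
        have e2 : ((n : Int) - 0).toNat = n := by omega
        rw [e1, e2, List.zip_map']
      rw [hz, maskLoop_spec n l 0 length (le_refl _)]
      congr 1
      have hkb : (0 : Int) ≤ (n : Int) - max 0 (min (n : Int) length) := by omega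
      rw [PySem.List.slice_to l hkb]
      have hd : List.drop n l = [] := by simp [hn]
      rw [hd, List.append_nil]
      have e3 : ((n : Int) - max 0 (min (n : Int) length)).toNat = n - (min (length - 0) (n : Int)).toNat := by omega
      have e4 : (max 0 (min (n : Int) length)).toNat = (min (length - 0) (n : Int)).toNat := by omega
      rw [e3, e4]
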